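-- pv_equiv track=rewrite | github.com/michelealbach/Dots-and-Boxes | search.py | fillInBoxes
-- ===== SOURCE A (Python) =====
-- def fillInBoxes(s_boxes, s_lines, p):
--     # for every box
--     for box in s_boxes:
--         fillin = True
--         # set fillin to false if there is an undrawn line around the box
--         for line in s_lines:
--             if box in line and s_lines[line] == 0:
--                 fillin = False
--                 break
--         if fillin and s_boxes[box] == "empty":
--             s_boxes[box] = p
--     return s_boxes
-- ===== SOURCE B (Python) =====
-- def fillInBoxes(s_boxes, s_lines, p):
--     # One pass over the lines: collect every box that touches an undrawn line,
--     # then one pass over the boxes filling the unblocked empty ones.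
--     # (Returns a new dict instead of mutating s_boxes in place; same return value.)
--     blocked = set()
--     for line, drawn in s_lines.items():
--         if drawn == 0:
--             blocked.update(line)
--     return {box: (p if owner == "empty" and box not in blocked else owner)
--             for box, owner in s_boxes.items()}
-- ===== Notes on version B (the rewrite author's own statement) =====
-- stated objective: faster
-- what changed: Instead of scanning all lines for every box (nested loops), B makes one pass over the lines to build a set of boxes adjacent to an undrawn line, then one pass over the boxes filling unblocked empty ones; B returns a new dict rather than mutating s_boxes in place.
import Mathlib
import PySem

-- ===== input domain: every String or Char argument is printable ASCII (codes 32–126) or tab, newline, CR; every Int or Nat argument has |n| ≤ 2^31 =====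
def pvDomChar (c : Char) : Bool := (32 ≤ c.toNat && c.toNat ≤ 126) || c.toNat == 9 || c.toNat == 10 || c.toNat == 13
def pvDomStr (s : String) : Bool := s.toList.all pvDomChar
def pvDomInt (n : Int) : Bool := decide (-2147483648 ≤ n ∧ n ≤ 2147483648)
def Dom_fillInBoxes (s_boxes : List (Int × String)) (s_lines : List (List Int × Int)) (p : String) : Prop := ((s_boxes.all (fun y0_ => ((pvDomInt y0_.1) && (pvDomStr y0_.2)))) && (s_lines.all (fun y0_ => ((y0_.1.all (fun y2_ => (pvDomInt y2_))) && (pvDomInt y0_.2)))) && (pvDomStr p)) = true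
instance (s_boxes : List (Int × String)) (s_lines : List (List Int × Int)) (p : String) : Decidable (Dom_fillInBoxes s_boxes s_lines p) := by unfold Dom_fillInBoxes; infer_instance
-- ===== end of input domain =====

-- B replaces A's per-box scan of all lines by one pass building the set of boxes touching an
-- undrawn line, then one pass over the boxes (asymptotically faster); A mutates s_boxes in place,
-- B returns a fresh dict — the equivalence proved here is about the RETURN value.


-- ===== PORT A =====
-- dict lookup d[k] (first matching key; k is always present in A's uses)
def pvGetA (d : List (Int × String)) (k : Int) : Option String :=
  match d with
  | [] => none
  | (k', v) :: r => if k' == k then some v else pvGetA r k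

-- dict assignment d[k] = v (overwrite in place; k is always present in A's uses)
def pvSetA (d : List (Int × String)) (k : Int) (v : String) : List (Int × String) :=
  match d with
  | [] => []
  | (k', v') :: r => if k' == k then (k', v) :: r else (k', v') :: pvSetA r k v

-- the inner 'for line in s_lines: if box in line and s_lines[line] == 0: fillin = False; break'
def pvFillin (s_lines : List (List Int × Int)) (box : Int) : Bool :=
  !(s_lines.any (fun l => l.1.contains box && l.2 == 0))

def fillInBoxes (s_boxes : List (Int × String)) (s_lines : List (List Int × Int)) (p : String) : List (Int × String) :=
  (s_boxes.map Prod.fst).foldl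
    (fun d box =>
      if pvFillin s_lines box && (pvGetA d box == some "empty") then pvSetA d box p else d)
    s_boxes

-- ===== PORT B =====
def fillInBoxes_alt (s_boxes : List (Int × String)) (s_lines : List (List Int × Int)) (p : String) : List (Int × String) :=
  let blocked : PySem.Set Int :=
    s_lines.foldl (fun s l => if l.2 == 0 then PySem.Set.update s l.1 else s) PySem.Set.empty
  s_boxes.map (fun bo =>
    if bo.2 == "empty" && !(PySem.Set.contains blocked bo.1) then (bo.1, p) else bo)

-- ===== PRECONDITION & SPEC =====
-- Pre_ excludes association lists with duplicate keys (in s_boxes or s_lines): those do not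
-- represent a Python dict, so the behaviour of either port there is an artefact of the encoding.
def Pre_fillInBoxes (s_boxes : List (Int × String)) (s_lines : List (List Int × Int)) (p : String) : Prop :=
  (s_boxes.map Prod.fst).Nodup ∧ (s_lines.map Prod.fst).Nodup
instance (s_boxes : List (Int × String)) (s_lines : List (List Int × Int)) (p : String) : Decidable (Pre_fillInBoxes s_boxes s_lines p) := by unfold Pre_fillInBoxes; infer_instance

def pvWitness_fillInBoxes : (List (Int × String)) × (List (List Int × Int)) × String :=
  ([(1, "empty"), (2, "x"), (3, "empty")], [([1, 2], 0), ([2, 3], 1), ([3], 1)], "P")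

def Spec_fillInBoxes (s_boxes : List (Int × String)) (s_lines : List (List Int × Int)) (p : String) (out : List (Int × String)) : Prop := out = fillInBoxes_alt s_boxes s_lines p
instance (s_boxes : List (Int × String)) (s_lines : List (List Int × Int)) (p : String) (out : List (Int × String)) : Decidable (Spec_fillInBoxes s_boxes s_lines p out) := by unfold Spec_fillInBoxes; infer_instance

-- ===== CLAIM (what is proved, stated in full; the proofs are below) =====
def Claim_equal_fillInBoxes : Prop := ∀ (s_boxes : List (Int × String)) (s_lines : List (List Int × Int)) (p : String), Dom_fillInBoxes s_boxes s_lines p → Pre_fillInBoxes s_boxes s_lines p → Spec_fillInBoxes s_boxes s_lines p (fillInBoxes s_boxes s_lines p)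

-- ===== LEMMAS AND PROOFS =====

-- membership after Set.add
theorem pv_contains_add (s : PySem.Set Int) (x y : Int) :
    PySem.Set.contains (PySem.Set.add s x) y = (PySem.Set.contains s y || x == y) := by
  simp only [PySem.Set.add, PySem.Set.contains]
  by_cases h : x ∈ s
  · by_cases hxy : y = x
    · simp [h, hxy]
    · simp [h, hxy, Ne.symm hxy]
  · by_cases hxy : y = x
    · simp [h, hxy]
    · simp [h, hxy, Ne.symm hxy]

-- membership after Set.update
theorem pv_contains_update (xs : List Int) (s : PySem.Set Int) (y : Int) :
    PySem.Set.contains (PySem.Set.update s xs) y = (PySem.Set.contains s y || xs.contains y) := by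
  induction xs generalizing s with
  | nil => simp [PySem.Set.update]
  | cons x r ih =>
      simp only [PySem.Set.update, List.foldl_cons] at *
      rw [ih (PySem.Set.add s x), pv_contains_add]
      by_cases hxy : y = x
      · simp [hxy]
      · have hb : (x == y) = false := beq_eq_false_iff_ne.mpr (Ne.symm hxy)
        simp [hxy, hb]

-- B's blocked set contains exactly the boxes A's inner loop finds
theorem pv_blocked_spec (s_lines : List (List Int × Int)) (s : PySem.Set Int) (box : Int) :
    PySem.Set.contains
      (s_lines.foldl (fun s l => if l.2 == 0 then PySem.Set.update s l.1 else s) s) box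
    = (PySem.Set.contains s box || s_lines.any (fun l => l.1.contains box && l.2 == 0)) := by
  induction s_lines generalizing s with
  | nil => simp
  | cons l r ih =>
      simp only [List.foldl_cons, List.any_cons]
      by_cases h : l.2 == 0
      · rw [if_pos h, ih, pv_contains_update]
        simp [h, Bool.or_assoc]
      · rw [if_neg h, ih]
        simp [h]

-- A's fold leaves an entry whose key is not among the remaining keys untouched
theorem pv_fold_cons (s_lines : List (List Int × Int)) (p : String)
    (hd : Int × String) (d : List (Int × String)) (ks : List Int) (h : hd.1 ∉ ks) :
    ks.foldl (fun d box =>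
        if pvFillin s_lines box && (pvGetA d box == some "empty") then pvSetA d box p else d)
      (hd :: d)
    = hd :: ks.foldl (fun d box =>
        if pvFillin s_lines box && (pvGetA d box == some "empty") then pvSetA d box p else d) d := by
  induction ks generalizing d with
  | nil => rfl
  | cons k r ih =>
      have hne : hd.1 ≠ k := by intro he; exact h (by simp [he])
      have hr : hd.1 ∉ r := fun hm => h (by simp [hm])
      simp only [List.foldl_cons]
      have hget : pvGetA (hd :: d) k = pvGetA d k := by
        obtain ⟨k', v'⟩ := hd
        simp only [pvGetA]
        rw [if_neg (by simpa using hne)]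
      have hset : pvSetA (hd :: d) k p = hd :: pvSetA d k p := by
        obtain ⟨k', v'⟩ := hd
        simp only [pvSetA]
        rw [if_neg (by simpa using hne)]
      rw [hget]
      by_cases hc : pvFillin s_lines k && (pvGetA d k == some "empty")
      · rw [if_pos hc, if_pos hc, hset, ih _ hr]
      · rw [if_neg hc, if_neg hc, ih _ hr]

-- main induction: A's fold over the keys of a duplicate-free dict is B's map
theorem pv_main (s_lines : List (List Int × Int)) (p : String)
    (d : List (Int × String)) (hnd : (d.map Prod.fst).Nodup) :
    (d.map Prod.fst).foldl (fun d box =>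
        if pvFillin s_lines box && (pvGetA d box == some "empty") then pvSetA d box p else d) d
    = d.map (fun bo => if bo.2 == "empty" && pvFillin s_lines bo.1 then (bo.1, p) else bo) := by
  induction d with
  | nil => rfl
  | cons hd r ih =>
      obtain ⟨k, v⟩ := hd
      simp only [List.map_cons, List.nodup_cons] at hnd
      obtain ⟨hk, hr⟩ := hnd
      simp only [List.map_cons, List.foldl_cons]
      have hget : pvGetA ((k, v) :: r) k = some v := by simp [pvGetA]
      rw [hget]
      have step : (if pvFillin s_lines k && (some v == some "empty") then pvSetA ((k, v) :: r) k p
          else (k, v) :: r)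
          = (k, if v == "empty" && pvFillin s_lines k then p else v) :: r := by
        by_cases hc : pvFillin s_lines k && (some v == some "empty")
        · rw [if_pos hc]
          have hv : (v == "empty") = true := by
            have := (Bool.and_eq_true _ _).mp hc
            simpa using this.2
          have hf : pvFillin s_lines k = true := ((Bool.and_eq_true _ _).mp hc).1
          simp [pvSetA, hv, hf]
        · rw [if_neg hc]
          have hcc : (v == "empty" && pvFillin s_lines k) = false := by
            cases hv : (v == "empty") <;> cases hf : pvFillin s_lines k <;> simp_all
          simp [hcc]
      rw [step, pv_fold_cons s_lines p (k, if v == "empty" && pvFillin s_lines k then p else v) r _ hk, ih hr]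
      congr 1
      by_cases hc : v == "empty" && pvFillin s_lines k <;> simp [hc]

-- ===== VERDICT (by name: the statement is the Claim_ definition above) =====
theorem fillInBoxes_spec : Claim_equal_fillInBoxes := by
  intro s_boxes s_lines p _ hpre
  unfold Spec_fillInBoxes fillInBoxes fillInBoxes_alt
  rw [pv_main s_lines p s_boxes hpre.1]
  apply List.map_congr_left
  intro bo _
  have hb : (!PySem.Set.contains
      (s_lines.foldl (fun s l => if l.2 == 0 then PySem.Set.update s l.1 else s) PySem.Set.empty)
      bo.1) = pvFillin s_lines bo.1 := by
    rw [pv_blocked_spec]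
    simp [PySem.Set.empty, PySem.Set.contains, pvFillin]
  rw [hb]
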